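-- pv_equiv track=rewrite | github.com/grimm004/in-assignment | alltoall_generator.py | increment_node
-- ===== SOURCE A (Python) =====
-- def increment_node(n, node):
--     # Builds the lexicographically next node after 'node' or signals that 'node'
--     # is the last node via 'last_node' = True.
--     last_node = True
--     all_checked = False
--     i = n - 1
--     while last_node == True and all_checked == False:
--         if node[i] < n - 1:
--             last_node = False
--             node[i] = node[i] + 1
--             for j in range(n - 1, i, -1):
--                 node[j] = 0
--         else:
--             i = i - 1
--             if i == -1:
--                 all_checked = True
--     return last_node, node
-- ===== SOURCE B (Python) =====
-- def increment_node(n, node):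
--     # Carry propagation by list surgery: gather the n digits of the prefix,
--     # peel maxed digits off its end while collecting the zeros the carry
--     # leaves behind, absorb the carry into the surviving last digit, and
--     # splice prefix + zeros back in place with one slice assignment.
--     digits = [node[k] for k in range(n)]
--     carried = []
--     while digits and digits[-1] >= n - 1:
--         digits.pop()
--         carried.append(0)
--     if not digits:
--         return True, node
--     digits[-1] += 1
--     node[:n] = digits + carried
--     return False, node
-- ===== Notes on version B (the rewrite author's own statement) =====
-- stated objective: simpler
-- what changed: Replaces A's flag-driven backward index scan with in-place increment and inner index-zeroing loop by carry propagation as list surgery: gather the n-digit prefix, peel maxed digits off its end collecting the carry zeros, bump the surviving last digit, splice prefix+zeros back with one slice assignment.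
-- intended difference: For n <= 0 on inputs where A returns at all (a digit of the wrapped prefix below n-1), A returns (False, node) with a digit 'incremented' and others zeroed reached only through Python's negative-index wraparound; B returns (True, node) unchanged, the intended answer since an odometer with no digit positions has no next node. — e.g. on increment_node(0, [-3]): A returns (false, [-2]), B returns (true, [-3])
import Mathlib
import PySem

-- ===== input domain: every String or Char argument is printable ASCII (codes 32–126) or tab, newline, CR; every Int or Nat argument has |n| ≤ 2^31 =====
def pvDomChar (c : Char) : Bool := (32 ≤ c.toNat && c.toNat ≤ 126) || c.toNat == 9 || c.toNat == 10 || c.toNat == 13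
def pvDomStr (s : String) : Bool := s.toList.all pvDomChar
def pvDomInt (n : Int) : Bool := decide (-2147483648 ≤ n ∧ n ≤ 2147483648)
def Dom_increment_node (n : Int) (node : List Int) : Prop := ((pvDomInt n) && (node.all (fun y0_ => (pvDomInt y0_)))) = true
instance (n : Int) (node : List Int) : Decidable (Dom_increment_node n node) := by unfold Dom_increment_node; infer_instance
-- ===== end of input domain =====

-- B replaces A's flag-driven backward index scan (with its inner zeroing loop) by
-- carry propagation as list surgery on a gathered prefix; return values proved equal
-- on Pre_ outside D_ (both mutate 'node' the same way in Python).


-- ===== PORT A =====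
-- for j in range(n - 1, i, -1): node[j] = 0   (indices are in range under Pre_)
def pvZeroSuffix (n : Int) (i : Int) (node : List Int) : List Int :=
  (PySem.List.pyRange (n - 1) i (-1)).foldl (fun acc j => PySem.List.pySetD acc j 0) node

-- the while loop, on fuel (the scan strictly decreases i; fuel is ample under Pre_);
-- node[i] with possibly negative i is pyGet? (none = IndexError, excluded by Pre_)
def pvLoopA (n : Int) (node : List Int) : Nat → Int → Bool × List Int
  | 0, _ => (true, node)          -- fuel exhausted: unreachable under Pre_
  | Nat.succ fuel, i =>
    match PySem.List.pyGet? node i with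
    | none => (true, node)        -- IndexError: excluded by Pre_
    | some v =>
      if v < n - 1 then
        (false, pvZeroSuffix n i (PySem.List.pySetD node i (v + 1)))
      else if i - 1 = -1 then (true, node)
      else pvLoopA n node fuel (i - 1)

def increment_node (n : Int) (node : List Int) : Bool × List Int :=
  pvLoopA n node (n + (node.length : Int) + 2).toNat (n - 1)

-- ===== PORT B =====
-- while digits and digits[-1] >= n - 1: digits.pop(); carried.append(0)
-- (each pass shortens digits by one, so digits.length passes suffice: fuel)
def pvPeel (n : Int) : Nat → List Int → List Int → List Int × List Int
  | 0, digits, carried => (digits, carried)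
  | fuel + 1, digits, carried =>
    match digits.getLast? with
    | none => (digits, carried)
    | some d =>
      if d < n - 1 then (digits, carried)
      else pvPeel n fuel digits.dropLast (carried ++ [0])

def increment_node_alt (n : Int) (node : List Int) : Bool × List Int :=
  -- digits = [node[k] for k in range(n)]   (pyGetD is exact here: the only
  -- IndexError, n > len(node), lies outside Pre_, where Python B raises too)
  let digits := (PySem.List.pyRange 0 n 1).map (fun k => PySem.List.pyGetD node k 0)
  match pvPeel n digits.length digits [] with
  | (ds, carried) =>
    match ds.getLast? with
    | none => (true, node)                                   -- if not digits
    | some d =>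
      -- digits[-1] += 1; node[:n] = digits + carried  (slice assignment: the
      -- replaced segment is exactly node[:n], so the result is the new segment
      -- followed by the untouched tail — exact for every n)
      (false, (ds.dropLast ++ [d + 1] ++ carried) ++ node.drop digits.length)

-- ===== PRECONDITION & SPEC =====
-- Pre_ is exactly where A returns: a proper scan (1 ≤ n ≤ len(node)), or n ≤ 0
-- where the wrapped backward scan finds a digit below n - 1 inside node[:len+n]
-- before running off the front; everywhere else A raises IndexError.
def Pre_increment_node (n : Int) (node : List Int) : Prop :=
  (1 ≤ n ∧ n ≤ (node.length : Int)) ∨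
    (n ≤ 0 ∧ ∃ x ∈ node.take ((node.length : Int) + n).toNat, x < n - 1)
instance (n : Int) (node : List Int) : Decidable (Pre_increment_node n node) := by
  unfold Pre_increment_node; infer_instance

def pvWitness_increment_node : Int × List Int := (2, [0, 1])

-- On n ≤ 0 (where A returns at all) A returns (False, node) with a digit
-- 'incremented' and others zeroed that it only reaches through Python's
-- negative-index wraparound; B returns (True, node) unchanged, the intended
-- answer: an odometer with no digit positions has no next node.
def D_increment_node (n : Int) (node : List Int) : Prop := n ≤ 0
instance (n : Int) (node : List Int) : Decidable (D_increment_node n node) := by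
  unfold D_increment_node; infer_instance

def Spec_increment_node (n : Int) (node : List Int) (out : Bool × List Int) : Prop := ¬ D_increment_node n node → out = increment_node_alt n node
instance (n : Int) (node : List Int) (out : Bool × List Int) : Decidable (Spec_increment_node n node out) := by unfold Spec_increment_node; infer_instance

def pvDiffWitness_increment_node : Int × List Int := (0, [-3])
def pvDiffWitnessOut_increment_node : (Bool × List Int) × (Bool × List Int) :=
  ((false, [-2]), (true, [-3]))

-- ===== CLAIM (what is proved, stated in full; the proofs are below) =====
def Claim_unchanged_increment_node : Prop := ∀ (n : Int) (node : List Int), Dom_increment_node n node → Pre_increment_node n node → Spec_increment_node n node (increment_node n node)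
def Claim_changed_increment_node : Prop := Dom_increment_node (pvDiffWitness_increment_node.1) (pvDiffWitness_increment_node.2) ∧ Pre_increment_node (pvDiffWitness_increment_node.1) (pvDiffWitness_increment_node.2) ∧ D_increment_node (pvDiffWitness_increment_node.1) (pvDiffWitness_increment_node.2) ∧ increment_node (pvDiffWitness_increment_node.1) (pvDiffWitness_increment_node.2) = pvDiffWitnessOut_increment_node.1 ∧ increment_node_alt (pvDiffWitness_increment_node.1) (pvDiffWitness_increment_node.2) = pvDiffWitnessOut_increment_node.2 ∧ pvDiffWitnessOut_increment_node.1 ≠ pvDiffWitnessOut_increment_node.2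
def Claim_exact_increment_node : Prop := ∀ (n : Int) (node : List Int), Dom_increment_node n node → Pre_increment_node n node → D_increment_node n node → increment_node n node ≠ increment_node_alt n node

-- ===== LEMMAS AND PROOFS =====

-- abbreviation used by the proofs for the 'last_node = False' branch of A
def pvStep (n : Int) (node : List Int) (i : Int) : List Int :=
  pvZeroSuffix n i (PySem.List.pySetD node i (PySem.List.pyGetD node i 0 + 1))

-- folding the countdown range [i+k, …, i+1] with set-to-0 zeroes that segment
theorem pv_fold_zero (i k : Nat) : ∀ L : List Int, i + k < L.length →
    (PySem.List.pyRange ((i : Int) + k) (i : Int) (-1)).foldl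
      (fun acc j => PySem.List.pySetD acc j 0) L
    = L.take (i + 1) ++ List.replicate k 0 ++ L.drop (i + 1 + k) := by
  induction k with
  | zero =>
    intro L hL
    rw [show ((i : Int) + (0 : Nat)) = (i : Int) by push_cast; ring,
      PySem.List.pyRange_neg_one_eq_nil le_rfl]
    simp
  | succ k ih =>
    intro L hL
    rw [PySem.List.pyRange_neg_one_cons (by push_cast; omega), List.foldl_cons]
    have hcast : ((i : Int) + ((k : Nat) + 1 : Nat)) = ((i + k + 1 : Nat) : Int) := by
      push_cast; ring
    have hcast2 : ((i : Int) + ((k : Nat) + 1 : Nat)) - 1 = ((i : Int) + (k : Nat)) := by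
      push_cast; ring
    rw [hcast2, hcast, PySem.List.pySetD_natCast]
    have hlen : i + k < (L.set (i + k + 1) 0).length := by rw [List.length_set]; omega
    rw [ih _ hlen]
    have h1 : (L.set (i + k + 1) 0).take (i + 1) = L.take (i + 1) :=
      List.take_set_of_le (by omega)
    have h2 : (L.set (i + k + 1) 0).drop (i + k + 1)
        = (0 : Int) :: L.drop (i + k + 2) := by
      rw [List.drop_eq_getElem_cons (by rw [List.length_set]; omega)]
      rw [List.getElem_set_self, List.drop_set_of_lt (by omega)]
    rw [h1, show i + 1 + k = i + k + 1 from by omega, h2, List.replicate_succ',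
      show i + 1 + (k + 1) = i + k + 2 from by omega]
    simp only [List.append_assoc, List.cons_append, List.nil_append]

-- one unfolding step of A's while loop, for a nonnegative in-range index
theorem pvLoopA_unfold (n : Int) (node : List Int) (fuel : Nat) (i : Nat)
    (hi : i < node.length) :
    pvLoopA n node (fuel + 1) (i : Int) =
      if PySem.List.pyGetD node (i : Int) 0 < n - 1 then (false, pvStep n node (i : Int))
      else if i = 0 then (true, node)
      else pvLoopA n node fuel ((i : Int) - 1) := by
  have hv : PySem.List.pyGetD node (i : Int) 0 = node[i] := by
    rw [PySem.List.pyGetD_natCast, List.getD_eq_getElem _ _ hi]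
  simp only [pvLoopA, PySem.List.pyGet?_natCast, List.getElem?_eq_getElem hi]
  unfold pvStep
  rw [hv]
  rcases Nat.eq_zero_or_pos i with h0 | h0
  · subst h0
    norm_num
  · rw [if_neg (show ¬ ((i : Int) - 1 = -1) from by omega),
      if_neg (show ¬ (i = 0) from by omega)]

-- the two defining equations of pvPeel, in concat form
theorem pvPeel_nil (n : Int) (fuel : Nat) (carried : List Int) :
    pvPeel n fuel [] carried = ([], carried) := by
  cases fuel <;> simp [pvPeel]

theorem pvPeel_concat (n : Int) (fuel : Nat) (l : List Int) (a : Int) (carried : List Int) :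
    pvPeel n (fuel + 1) (l ++ [a]) carried =
      if a < n - 1 then (l ++ [a], carried) else pvPeel n fuel l (carried ++ [0]) := by
  simp [pvPeel]

-- the 'last_node = False' branch equals B's dropLast/concat/replicate splice
theorem pv_step_eq (n : Int) (node : List Int) (j : Nat) (hn1 : 1 ≤ n)
    (hj : (j : Int) < n) (hlen : n ≤ (node.length : Int)) :
    pvStep n node (j : Int) =
      node.take j ++ [node.getD j 0 + 1] ++ List.replicate (n - 1 - (j : Int)).toNat 0
        ++ node.drop n.toNat := by
  unfold pvStep pvZeroSuffix
  rw [PySem.List.pyGetD_natCast, PySem.List.pySetD_natCast]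
  have hk : (n - 1 : Int) = (j : Int) + (((n - 1 - (j : Int)).toNat : Nat) : Int) := by omega
  rw [show PySem.List.pyRange (n - 1) ((j : Nat) : Int) (-1)
        = PySem.List.pyRange (((j : Nat) : Int) + (((n - 1 - (j : Int)).toNat : Nat) : Int)) ((j : Nat) : Int) (-1)
      from by rw [← hk]]
  rw [pv_fold_zero j (n - 1 - (j : Int)).toNat _ (by rw [List.length_set]; omega)]
  have hjlen : j < node.length := by omega
  have h1 : (node.set j (node.getD j 0 + 1)).take (j + 1) = node.take j ++ [node.getD j 0 + 1] := by
    rw [List.take_add_one, List.take_set_of_le le_rfl,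
      List.getElem?_set_self (by omega)]
    simp
  have h2 : (node.set j (node.getD j 0 + 1)).drop (j + 1 + (n - 1 - (j : Int)).toNat)
      = node.drop n.toNat := by
    rw [show j + 1 + (n - 1 - (j : Int)).toNat = n.toNat from by omega,
      List.drop_set_of_lt (by omega)]
  rw [h1, h2, List.append_assoc, List.append_assoc]

-- A's backward scan agrees with B's peel of the length-m prefix carrying the
-- zeros already emitted for positions m … n-1
theorem pv_loop_peel (n : Int) (node : List Int) (hn1 : 1 ≤ n)
    (hlen : n ≤ (node.length : Int)) :
    ∀ m : Nat, ∀ fuel : Nat, 1 ≤ m → (m : Int) ≤ n → m ≤ fuel →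
      pvLoopA n node fuel ((m : Int) - 1) =
        (match pvPeel n m (node.take m) (List.replicate (n - m).toNat 0) with
         | (ds, carried) =>
           match ds.getLast? with
           | none => (true, node)
           | some d => (false, (ds.dropLast ++ [d + 1] ++ carried) ++ node.drop n.toNat)) := by
  intro m
  induction m with
  | zero => intro fuel h; omega
  | succ m ih =>
    intro fuel _ hm hf
    obtain ⟨f, rfl⟩ : ∃ f, fuel = f + 1 := ⟨fuel - 1, by omega⟩
    have hmlen : m < node.length := by omega
    have htake : node.take (m + 1) = node.take m ++ [node.getD m 0] := by
      rw [List.take_add_one, List.getElem?_eq_getElem hmlen, List.getD_eq_getElem _ _ hmlen]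
      simp
    rw [show (((m + 1 : Nat) : Nat) : Int) - 1 = ((m : Nat) : Int) from by push_cast; ring]
    rw [pvLoopA_unfold n node f m hmlen]
    have hv : PySem.List.pyGetD node ((m : Nat) : Int) 0 = node.getD m 0 := by
      rw [PySem.List.pyGetD_natCast]
    rw [htake, pvPeel_concat, hv]
    by_cases hc : node.getD m 0 < n - 1
    · rw [if_pos hc, if_pos hc]
      simp only [List.getLast?_concat, List.dropLast_concat]
      rw [pv_step_eq n node m hn1 (by omega) hlen,
        show (n - 1 - (m : Int)).toNat = (n - ((m + 1 : Nat) : Int)).toNat from by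
          push_cast; omega]
    · rw [if_neg hc, if_neg hc]
      rcases Nat.eq_zero_or_pos m with hm0 | hm1
      · subst hm0
        rw [if_pos rfl]
        simp [pvPeel_nil]
      · rw [if_neg (by omega)]
        rw [ih f hm1 (by omega) (by omega)]
        rw [show List.replicate (n - (m + 1 : Nat)).toNat 0 ++ [(0 : Int)]
              = List.replicate (n - (m : Nat)).toNat 0 from by
            rw [← List.replicate_succ' (n := (n - (m + 1 : Nat)).toNat)]
            congr 1
            push_cast
            omega]


-- wrapped (negative) index accesses, for the n ≤ 0 runs: node[p - len] is node[p]
theorem pv_setD_neg (xs : List Int) (p : Nat) (v : Int) (h : p < xs.length) :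
    PySem.List.pySetD xs ((p : Int) - xs.length) v = xs.set p v := by
  simp only [PySem.List.pySetD, PySem.List.pySet?, PySem.List.pyIdx?]
  rw [if_neg (by omega), if_pos (by omega)]
  simp only [Option.map_some, Option.getD_some]
  congr 1
  omega

-- mirror of pv_fold_zero for a countdown of wrapped indices
theorem pv_fold_zero_neg (p k Llen : Nat) : ∀ L : List Int, L.length = Llen → p + k < Llen →
    (PySem.List.pyRange ((p : Int) + k - Llen) ((p : Int) - Llen) (-1)).foldl
      (fun acc j => PySem.List.pySetD acc j 0) L
    = L.take (p + 1) ++ List.replicate k 0 ++ L.drop (p + 1 + k) := by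
  induction k with
  | zero =>
    intro L hL _
    rw [show ((p : Int) + (0 : Nat) - Llen) = ((p : Int) - Llen) from by push_cast; ring,
      PySem.List.pyRange_neg_one_eq_nil le_rfl]
    simp
  | succ k ih =>
    intro L hL hpk
    rw [PySem.List.pyRange_neg_one_cons (by push_cast; omega), List.foldl_cons]
    rw [show (p : Int) + ((k : Nat) + 1 : Nat) - Llen - 1 = (p : Int) + (k : Nat) - Llen from by
      push_cast; ring]
    rw [show (p : Int) + ((k : Nat) + 1 : Nat) - Llen = ((p + k + 1 : Nat) : Int) - L.length from by
      push_cast; omega]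
    rw [pv_setD_neg L (p + k + 1) 0 (by omega)]
    have hlen : (L.set (p + k + 1) 0).length = Llen := by rw [List.length_set]; exact hL
    rw [ih _ hlen (by omega)]
    have h1 : (L.set (p + k + 1) 0).take (p + 1) = L.take (p + 1) :=
      List.take_set_of_le (by omega)
    have h2 : (L.set (p + k + 1) 0).drop (p + k + 1)
        = (0 : Int) :: L.drop (p + k + 2) := by
      rw [List.drop_eq_getElem_cons (by rw [List.length_set]; omega)]
      rw [List.getElem_set_self, List.drop_set_of_lt (by omega)]
    rw [h1, show p + 1 + k = p + k + 1 from by omega, h2, List.replicate_succ',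
      show p + 1 + (k + 1) = p + k + 2 from by omega]
    simp only [List.append_assoc, List.cons_append, List.nil_append]

-- one unfolding step of A's while loop, wrapped index p - len (p < len, so the
-- scan can only leave through a hit or a further decrement, never all_checked)
theorem pvLoopA_unfold_neg (n : Int) (node : List Int) (fuel : Nat) (p : Nat)
    (hp : p < node.length) :
    pvLoopA n node (fuel + 1) ((p : Int) - node.length) =
      if node.getD p 0 < n - 1 then
        (false, pvZeroSuffix n ((p : Int) - node.length) (node.set p (node.getD p 0 + 1)))
      else pvLoopA n node fuel ((p : Int) - node.length - 1) := by
  have hget : PySem.List.pyGet? node ((p : Int) - node.length) = some (node.getD p 0) := by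
    rw [show (p : Int) - node.length = -(((node.length - p : Nat) : Nat) : Int) from by omega,
      PySem.List.pyGet?_neg_natCast node (node.length - p) (by omega) (by omega)]
    rw [show node.length - (node.length - p) = p from by omega,
      List.getElem?_eq_getElem hp, List.getD_eq_getElem _ _ hp]
  simp only [pvLoopA, hget]
  rw [pv_setD_neg node p _ hp]
  rw [if_neg (show ¬ ((p : Int) - node.length - 1 = -1) from by omega)]

-- the hit branch of a wrapped scan, in splice form (N = len + n prefix positions)
theorem pv_step_eq_neg (n : Int) (node : List Int) (p N : Nat)
    (hN : (N : Int) = (node.length : Int) + n) (hp : p < N) (hNL : N ≤ node.length) :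
    pvZeroSuffix n ((p : Int) - node.length) (node.set p (node.getD p 0 + 1)) =
      node.take p ++ [node.getD p 0 + 1] ++ List.replicate (N - (p + 1)) 0
        ++ node.drop N := by
  unfold pvZeroSuffix
  rw [show (n - 1 : Int) = (p : Int) + ((N - (p + 1) : Nat) : Int) - (node.length : Int) from by omega]
  rw [pv_fold_zero_neg p (N - (p + 1)) node.length _ (by rw [List.length_set]) (by omega)]
  have hplen : p < node.length := by omega
  have h1 : (node.set p (node.getD p 0 + 1)).take (p + 1) = node.take p ++ [node.getD p 0 + 1] := by
    rw [List.take_add_one, List.take_set_of_le le_rfl, List.getElem?_set_self (by omega)]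
    simp
  have h2 : (node.set p (node.getD p 0 + 1)).drop (p + 1 + (N - (p + 1)))
      = node.drop N := by
    rw [show p + 1 + (N - (p + 1)) = N from by omega, List.drop_set_of_lt (by omega)]
  rw [h1, h2, List.append_assoc, List.append_assoc]

-- wrapped analogue of pv_loop_peel: the n ≤ 0 scan over positions 0 … N-1
-- (N = len + n) agrees with B's peel of the length-m prefix, as long as a hit
-- exists in that prefix (without one A runs off the front and raises)
theorem pv_loop_peel_neg (n : Int) (node : List Int) (N : Nat) (hn : n ≤ 0)
    (hN : (N : Int) = (node.length : Int) + n) :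
    ∀ m : Nat, ∀ fuel : Nat, 1 ≤ m → m ≤ N → m ≤ fuel →
      (∃ x ∈ node.take m, x < n - 1) →
      pvLoopA n node fuel ((m : Int) - 1 - node.length) =
        (match pvPeel n m (node.take m) (List.replicate (N - m) 0) with
         | (ds, carried) =>
           match ds.getLast? with
           | none => (true, node)
           | some d => (false, (ds.dropLast ++ [d + 1] ++ carried) ++ node.drop N)) := by
  have hNL : N ≤ node.length := by omega
  intro m
  induction m with
  | zero => intro fuel h; omega
  | succ m ih =>
    intro fuel _ hm hf hhit
    obtain ⟨f, rfl⟩ : ∃ f, fuel = f + 1 := ⟨fuel - 1, by omega⟩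
    have hmlen : m < node.length := by omega
    have htake : node.take (m + 1) = node.take m ++ [node.getD m 0] := by
      rw [List.take_add_one, List.getElem?_eq_getElem hmlen, List.getD_eq_getElem _ _ hmlen]
      simp
    rw [show (((m + 1 : Nat) : Nat) : Int) - 1 - node.length = ((m : Nat) : Int) - node.length from by
      push_cast; ring]
    rw [pvLoopA_unfold_neg n node f m hmlen]
    rw [htake, pvPeel_concat]
    by_cases hc : node.getD m 0 < n - 1
    · rw [if_pos hc, if_pos hc]
      simp only [List.getLast?_concat, List.dropLast_concat]
      rw [pv_step_eq_neg n node m N hN (by omega) hNL]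
    · rw [if_neg hc, if_neg hc]
      have hhit' : ∃ x ∈ node.take m, x < n - 1 := by
        rcases hhit with ⟨x, hx, hxlt⟩
        rw [htake] at hx
        rcases List.mem_append.mp hx with h | h
        · exact ⟨x, h, hxlt⟩
        · simp only [List.mem_singleton] at h
          subst h; omega
      have hm1 : 1 ≤ m := by
        by_contra h0
        obtain rfl : m = 0 := by omega
        simp at hhit'
      rw [show ((m : Nat) : Int) - (node.length : Int) - 1 = ((m : Nat) : Int) - 1 - node.length from by ring]
      rw [ih f hm1 (by omega) (by omega) hhit']
      rw [show List.replicate (N - (m + 1)) (0 : Int) ++ [(0 : Int)]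
            = List.replicate (N - m) 0 from by
          rw [← List.replicate_succ' (n := N - (m + 1))]
          congr 1
          omega]

-- a peel that starts above a digit below n - 1 cannot exhaust its input
theorem pvPeel_hit (n : Int) : ∀ (ds : List Int) (c : List Int),
    (∃ x ∈ ds, x < n - 1) → (pvPeel n ds.length ds c).1.getLast? ≠ none := by
  intro ds
  induction ds using List.reverseRecOn with
  | nil => intro c h; simp at h
  | append_singleton l a ih =>
    intro c hhit
    rw [show (l ++ [a]).length = l.length + 1 from by simp, pvPeel_concat]
    by_cases hc : a < n - 1
    · rw [if_pos hc]
      simp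
    · rw [if_neg hc]
      apply ih
      rcases hhit with ⟨x, hx, hxlt⟩
      rcases List.mem_append.mp hx with h | h
      · exact ⟨x, h, hxlt⟩
      · simp only [List.mem_singleton] at h
        subst h; omega


-- [node[k] for k in range(n)] is node.take n for 0 ≤ n ≤ len(node)
theorem pv_digits_eq (n : Int) (node : List Int) (h0 : 0 ≤ n) (hlen : n ≤ (node.length : Int)) :
    (PySem.List.pyRange 0 n 1).map (fun k => PySem.List.pyGetD node k 0) = node.take n.toNat := by
  rw [PySem.List.pyRange_one]
  rw [List.map_map]
  apply List.ext_getElem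
  · simp [List.length_take]; omega
  · intro i h1 h2
    simp only [List.getElem_map, List.getElem_range, Function.comp_apply, List.getElem_take]
    rw [show (0 : Int) + (i : Nat) = ((i : Nat) : Int) from by ring, PySem.List.pyGetD_natCast]
    have hi : i < node.length := by
      simp only [List.length_map, List.length_range] at h1
      omega
    rw [List.getD_eq_getElem _ _ hi]

-- for n ≤ 0 the comprehension gathers nothing
theorem pv_digits_nil (n : Int) (node : List Int) (hn : n ≤ 0) :
    (PySem.List.pyRange 0 n 1).map (fun k => PySem.List.pyGetD node k 0) = [] := by
  rw [PySem.List.pyRange_one_eq_nil hn]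
  rfl

-- ===== VERDICT (by name: the statement is the Claim_ definition above) =====
theorem increment_node_spec : Claim_unchanged_increment_node := by
  intro n node _ hpre hnd
  have hn : 1 ≤ n := by
    rcases hpre with h | h
    · exact h.1
    · exact absurd h.1 hnd
  have hlen : n ≤ (node.length : Int) := by
    rcases hpre with h | h
    · exact h.2
    · exact absurd h.1 hnd
  unfold increment_node increment_node_alt
  rw [pv_digits_eq n node (by omega) hlen]
  have hdlen : (node.take n.toNat).length = n.toNat := by
    rw [List.length_take]; omega
  have h := pv_loop_peel n node hn hlen n.toNat (n + (node.length : Int) + 2).toNat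
    (by omega) (by omega) (by omega)
  rw [show ((n.toNat : Nat) : Int) - 1 = n - 1 from by omega] at h
  rw [show (n - (n.toNat : Nat)).toNat = 0 from by omega] at h
  simp only [List.replicate_zero] at h
  simp only [hdlen]
  exact h

theorem increment_node_changed : Claim_changed_increment_node := by
  unfold Claim_changed_increment_node; decide

theorem increment_node_tight : Claim_exact_increment_node := by
  intro n node _ hpre hd
  have hn0 : n ≤ 0 := hd
  have hhit : ∃ x ∈ node.take ((node.length : Int) + n).toNat, x < n - 1 := by
    rcases hpre with ⟨h1, _⟩ | ⟨_, hhit⟩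
    · omega
    · exact hhit
  set N : Nat := ((node.length : Int) + n).toNat with hNdef
  have hN1 : 1 ≤ N := by
    rcases hhit with ⟨x, hx, _⟩
    rcases Nat.eq_zero_or_pos N with h0 | h1
    · rw [h0] at hx; simp at hx
    · exact h1
  have hN : (N : Int) = (node.length : Int) + n := by omega
  -- A finds the wrapped hit and returns last_node = False
  have hA : (increment_node n node).1 = false := by
    unfold increment_node
    have h := pv_loop_peel_neg n node N hn0 hN N ((n + (node.length : Int) + 2).toNat)
      hN1 le_rfl (by omega) hhit
    rw [show ((N : Nat) : Int) - 1 - node.length = n - 1 from by omega] at h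
    rw [h, Nat.sub_self]
    have htlen : (node.take N).length = N := by rw [List.length_take]; omega
    have hne := pvPeel_hit n (node.take N) (List.replicate 0 0) (by exact hhit)
    rw [htlen] at hne
    rcases hpeel : pvPeel n N (node.take N) (List.replicate 0 0) with ⟨ds, carried⟩
    rw [hpeel] at hne
    simp only at hne ⊢
    cases hlast : ds.getLast? with
    | none => exact absurd hlast hne
    | some d => rfl
  -- B gathers no digits for n ≤ 0 and returns last_node = True
  have hB : (increment_node_alt n node).1 = true := by
    unfold increment_node_alt
    rw [pv_digits_nil n node hn0]
    simp [pvPeel]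
  intro hEq
  rw [hEq] at hA
  rw [hA] at hB
  exact Bool.false_ne_true hB
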